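-- pv_equiv track=rewrite | github.com/hwhong/CS-131 | Project/server.py | latlong
-- ===== SOURCE A (Python) =====
-- def latlong(coords):
-- 	# input sanity check
-- 	symb_counts = 0
-- 	for c in coords:
-- 		if c == "+" or c == "-":
-- 			symb_counts+=1
-- 	if symb_counts != 2:
-- 		return None
--
-- 	i = 0
-- 	# the last signed symbol
-- 	for idx in range(len(coords)):
-- 		if coords[idx] == "+" or coords[idx] == "-":
-- 			i = idx
--
-- 	return [coords[:i],coords[i:]]
-- ===== SOURCE B (Python) =====
-- def latlong(coords):
-- 	def split_last(s):
-- 		# peel characters off the right end until the last sign;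
-- 		# return (prefix before it, suffix from it), or None if s has no sign
-- 		stack = list(s)
-- 		suffix = []
-- 		while stack:
-- 			last = stack.pop()
-- 			if last == "+" or last == "-":
-- 				return ("".join(stack), last + "".join(reversed(suffix)))
-- 			suffix.append(last)
-- 		return None
--
-- 	r = split_last(coords)
-- 	if r is None:
-- 		return None
-- 	r2 = split_last(r[0])
-- 	if r2 is None:
-- 		return None
-- 	if split_last(r2[0]) is not None:
-- 		return None
-- 	return [r[0], r[1]]
-- ===== Notes on version B (the rewrite author's own statement) =====
-- stated objective: alternative
-- what changed: Replaces A's two left-to-right index passes (a running sign counter over the whole string, then a second indexed scan keeping the last sign position) by a right-to-left stack peel with early exit that pops characters off the end until the last sign and builds the two substrings directly; applied up to three times it also decides whether exactly two signs exist, so there is no counter and no index arithmetic.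
import Mathlib
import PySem

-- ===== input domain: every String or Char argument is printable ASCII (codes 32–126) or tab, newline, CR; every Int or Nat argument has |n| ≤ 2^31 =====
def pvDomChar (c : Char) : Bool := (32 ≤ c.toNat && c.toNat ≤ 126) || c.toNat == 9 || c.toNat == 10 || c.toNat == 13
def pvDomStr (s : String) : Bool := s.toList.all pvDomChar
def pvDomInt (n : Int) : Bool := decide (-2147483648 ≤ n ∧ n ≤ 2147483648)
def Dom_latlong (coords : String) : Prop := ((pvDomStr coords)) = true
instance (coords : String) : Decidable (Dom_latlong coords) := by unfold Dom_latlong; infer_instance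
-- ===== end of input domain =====

-- B replaces A's two left-to-right index passes (a sign counter, then a last-sign index scan)
-- by a recursive right-to-left splitter that peels characters off the end until the last sign
-- and builds the two substrings directly; objective: alternative decomposition (same result).

-- ===== PORT A =====
def latlong (coords : String) : Option (List String) :=
  let cs := coords.toList
  let symb_counts : Int := cs.foldl (fun acc c => if c = '+' ∨ c = '-' then acc + 1 else acc) 0
  if symb_counts ≠ 2 then none
  else
    -- for idx in range(len(coords)): if coords[idx] in "+-": i = idx
    let i : Int := (PySem.List.pyRange 0 (cs.length : Int) 1).foldl
      (fun i idx =>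
        if PySem.List.pyGetD cs idx ' ' = '+' ∨ PySem.List.pyGetD cs idx ' ' = '-' then idx else i) 0
    some [PySem.Str.slice coords none (some i), PySem.Str.slice coords (some i) none]

-- ===== PORT B =====
-- split_last(s): pop characters off a stack (the right end of s) until the last sign is found,
-- returning (prefix = remaining stack, suffix = sign + popped characters back in order), else None.
-- Python's suffix.append is suffix ++ [last]; 'last + "".join(reversed(suffix))' is last :: suffix.reverse.
-- Strings are carried as List Char (the standard bridge); "".join at return is String.ofList below.
def pvPeel (stack : List Char) (suffix : List Char) : Option (List Char × List Char) :=
  if h : stack = [] then none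
  else
    let last := stack.getLast h
    let stack' := stack.dropLast
    if last = '+' ∨ last = '-' then some (stack', last :: suffix.reverse)
    else pvPeel stack' (suffix ++ [last])
termination_by stack.length
decreasing_by
  have : stack.length ≠ 0 := by simpa using h
  simp only [List.length_dropLast]; omega

def pvSplitLast (s : List Char) : Option (List Char × List Char) :=
  pvPeel s []

def latlong_alt (coords : String) : Option (List String) :=
  match pvSplitLast coords.toList with
  | none => none
  | some r =>
    match pvSplitLast r.1 with
    | none => none
    | some r2 =>
      match pvSplitLast r2.1 with
      | some _ => none
      | none => some [String.ofList r.1, String.ofList r.2]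

-- ===== PRECONDITION & SPEC =====
def Spec_latlong (coords : String) (out : Option (List String)) : Prop := out = latlong_alt coords
instance (coords : String) (out : Option (List String)) : Decidable (Spec_latlong coords out) := by unfold Spec_latlong; infer_instance

-- ===== CLAIM (what is proved, stated in full; the proofs are below) =====
def Claim_equal_latlong : Prop := ∀ (coords : String), Dom_latlong coords → Spec_latlong coords (latlong coords)

-- ===== LEMMAS AND PROOFS =====

-- A's counting loop counts exactly the sign characters
theorem pv_count_eq (cs : List Char) (n : Int) :
    cs.foldl (fun acc c => if c = '+' ∨ c = '-' then acc + 1 else acc) n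
      = n + (cs.countP (fun c => decide (c = '+' ∨ c = '-')) : Int) := by
  induction cs generalizing n with
  | nil => simp
  | cons c cs ih =>
    by_cases h : c = '+' ∨ c = '-'
    · simp [h, ih]; ring
    · simp [h, ih]

-- A's "keep the last matching index" fold is the last element of the sign-position list
theorem pv_last_eq (l : List (Int × Char)) (i0 : Int) :
    l.foldl (fun i p => if p.2 = '+' ∨ p.2 = '-' then p.1 else i) i0
      = ((l.filter (fun p => p.2 = '+' ∨ p.2 = '-')).map Prod.fst).getLastD i0 := by
  induction l generalizing i0 with
  | nil => simp
  | cons p l ih =>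
    by_cases h : p.2 = '+' ∨ p.2 = '-'
    · rw [List.foldl_cons, if_pos h, ih, List.filter_cons_of_pos (by simpa using h),
        List.map_cons, List.getLastD_cons]
    · rw [List.foldl_cons, if_neg h, ih, List.filter_cons_of_neg (by simpa using h)]

-- a sign-free enumerated list filters to nothing
theorem pv_filter_nil (v : List Char) (s : Int)
    (hv : ∀ d ∈ v, ¬(d = '+' ∨ d = '-')) :
    (PySem.List.enumerate v s).filter (fun p => p.2 = '+' ∨ p.2 = '-') = [] := by
  induction v generalizing s with
  | nil => simp [PySem.List.enumerate_nil]
  | cons d v ih =>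
    rw [PySem.List.enumerate_cons,
      List.filter_cons_of_neg (by simpa using hv d (by simp))]
    exact ih _ (fun d hd => hv d (by simp [hd]))

-- unfolding pvPeel on a stack with a last character
theorem pvPeel_concat (l : List Char) (d : Char) (suf : List Char) :
    pvPeel (l ++ [d]) suf = if d = '+' ∨ d = '-' then some (l, d :: suf.reverse)
      else pvPeel l (suf ++ [d]) := by
  rw [pvPeel]
  simp

-- sign-free strings: split_last returns None
theorem pv_peel_none (v : List Char)
    (hv : ∀ d ∈ v, ¬(d = '+' ∨ d = '-')) : ∀ suf, pvPeel v suf = none := by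
  induction v using List.reverseRecOn with
  | nil => intro suf; simp [pvPeel]
  | append_singleton v d ih =>
    intro suf
    rw [pvPeel_concat, if_neg (hv d (by simp)), ih (fun e he => hv e (by simp [he]))]

theorem pv_splitLast_none (v : List Char)
    (hv : ∀ d ∈ v, ¬(d = '+' ∨ d = '-')) : pvSplitLast v = none :=
  pv_peel_none v hv []

-- split_last splits at the last sign
theorem pv_peel_some (u : List Char) (c : Char) (v : List Char)
    (hc : c = '+' ∨ c = '-') (hv : ∀ d ∈ v, ¬(d = '+' ∨ d = '-')) :
    ∀ suf, pvPeel (u ++ c :: v) suf = some (u, c :: v ++ suf.reverse) := by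
  induction v using List.reverseRecOn with
  | nil =>
    intro suf
    rw [show u ++ [c] = u ++ [c] from rfl, pvPeel_concat, if_pos hc]
    simp
  | append_singleton v d ih =>
    intro suf
    rw [show u ++ c :: (v ++ [d]) = (u ++ c :: v) ++ [d] by simp, pvPeel_concat,
      if_neg (hv d (by simp)), ih (fun e he => hv e (by simp [he]))]
    simp

theorem pv_splitLast_some (u : List Char) (c : Char) (v : List Char)
    (hc : c = '+' ∨ c = '-') (hv : ∀ d ∈ v, ¬(d = '+' ∨ d = '-')) :
    pvSplitLast (u ++ c :: v) = some (u, c :: v) := by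
  rw [pvSplitLast, pv_peel_some u c v hc hv []]
  simp

-- every string is sign-free or splits at its last sign
theorem pv_decomp (cs : List Char) :
    (∀ d ∈ cs, ¬(d = '+' ∨ d = '-')) ∨
    ∃ u c v, cs = u ++ c :: v ∧ (c = '+' ∨ c = '-') ∧ ∀ d ∈ v, ¬(d = '+' ∨ d = '-') := by
  induction cs using List.reverseRecOn with
  | nil => left; simp
  | append_singleton cs x ih =>
    by_cases hx : x = '+' ∨ x = '-'
    · right; exact ⟨cs, x, [], by simp, hx, by simp⟩
    · rcases ih with h | ⟨u, c, v, rfl, hc, hv⟩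
      · left; intro d hd
        rcases List.mem_append.1 hd with hd | hd
        · exact h d hd
        · simp at hd; subst hd; exact hx
      · right
        refine ⟨u, c, v ++ [x], by simp, hc, fun d hd => ?_⟩
        rcases List.mem_append.1 hd with hd | hd
        · exact hv d hd
        · simp at hd; subst hd; exact hx

-- the sign-position list of u ++ c :: v (v sign-free) ends at u.length
theorem pv_signs_last (u : List Char) (c : Char) (v : List Char)
    (hc : c = '+' ∨ c = '-') (hv : ∀ d ∈ v, ¬(d = '+' ∨ d = '-')) :
    ((((PySem.List.enumerate (u ++ c :: v) 0).filter
        (fun p => p.2 = '+' ∨ p.2 = '-')).map Prod.fst).getLastD 0) = (u.length : Int) := by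
  rw [PySem.List.enumerate_append, List.filter_append, PySem.List.enumerate_cons,
    List.filter_cons_of_pos (by simpa using hc), pv_filter_nil v _ hv]
  simp

-- sign-free means countP = 0
theorem pv_countP_zero (v : List Char) (hv : ∀ d ∈ v, ¬(d = '+' ∨ d = '-')) :
    v.countP (fun c => decide (c = '+' ∨ c = '-')) = 0 := by
  rw [List.countP_eq_zero]; intro a ha; simpa using hv a ha

-- ===== VERDICT (by name: the statement is the Claim_ definition above) =====
theorem latlong_spec : Claim_equal_latlong := by
  intro coords _
  unfold Spec_latlong latlong latlong_alt
  set cs := coords.toList with hcs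
  have hcount := pv_count_eq cs 0
  have hidx : PySem.List.enumerate cs 0
      = (PySem.List.pyRange 0 (cs.length : Int) 1).map (fun j => (j, PySem.List.pyGetD cs j ' ')) :=
    PySem.List.enumerate_eq_map_pyRange cs ' '
  have hfold : (PySem.List.pyRange 0 (cs.length : Int) 1).foldl
      (fun i idx =>
        if PySem.List.pyGetD cs idx ' ' = '+' ∨ PySem.List.pyGetD cs idx ' ' = '-' then idx else i) 0
      = (((PySem.List.enumerate cs 0).filter
          (fun p => p.2 = '+' ∨ p.2 = '-')).map Prod.fst).getLastD 0 := by
    have := pv_last_eq (PySem.List.enumerate cs 0) 0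
    rw [hidx, List.foldl_map] at this
    rw [this, hidx]
  rcases pv_decomp cs with h0 | ⟨u, c, v, hdec, hc, hv⟩
  · -- no sign at all: both None
    have hcnt0 : cs.countP (fun c => decide (c = '+' ∨ c = '-')) = 0 := pv_countP_zero cs h0
    simp only [hcount, hcnt0, pv_splitLast_none cs h0]
    norm_num
  · -- cs = u ++ c :: v, c the last sign
    have hBsplit : pvSplitLast cs = some (u, c :: v) := hdec ▸ pv_splitLast_some u c v hc hv
    have hcntcs : cs.countP (fun c => decide (c = '+' ∨ c = '-'))
        = u.countP (fun c => decide (c = '+' ∨ c = '-')) + 1 := by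
      rw [hdec, List.countP_append, List.countP_cons_of_pos (by simpa using hc),
        pv_countP_zero v hv]
    rcases pv_decomp u with h1 | ⟨u', c', v', hdec', hc', hv'⟩
    · -- exactly one sign: both None
      have hcnt1 : cs.countP (fun c => decide (c = '+' ∨ c = '-')) = 1 := by
        rw [hcntcs, pv_countP_zero u h1]
      simp only [hcount, hcnt1, hBsplit, pv_splitLast_none u h1]
      norm_num
    · have hBsplit' : pvSplitLast u = some (u', c' :: v') := hdec' ▸ pv_splitLast_some u' c' v' hc' hv'
      have hcntu : u.countP (fun c => decide (c = '+' ∨ c = '-'))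
          = u'.countP (fun c => decide (c = '+' ∨ c = '-')) + 1 := by
        rw [hdec', List.countP_append, List.countP_cons_of_pos (by simpa using hc'),
          pv_countP_zero v' hv']
      rcases pv_decomp u' with h2 | ⟨u'', c'', v'', hdec'', hc'', hv''⟩
      · -- exactly two signs: both split at u.length
        have hcnt2 : cs.countP (fun c => decide (c = '+' ∨ c = '-')) = 2 := by
          rw [hcntcs, hcntu, pv_countP_zero u' h2]
        have hlast : (((PySem.List.enumerate cs 0).filter
            (fun p => p.2 = '+' ∨ p.2 = '-')).map Prod.fst).getLastD 0 = (u.length : Int) :=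
          hdec ▸ pv_signs_last u c v hc hv
        have htake : PySem.List.slice cs none (some (u.length : Int)) = u := by
          rw [PySem.List.slice_to_natCast, hdec, List.take_left]
        have hdrop : PySem.List.slice cs (some (u.length : Int)) none = c :: v := by
          rw [PySem.List.slice_from_natCast, hdec, List.drop_left]
        simp only [hcount, hcnt2, hfold, hlast, hBsplit, hBsplit', pv_splitLast_none u' h2]
        norm_num
        constructor
        · simp [PySem.Str.slice, ← hcs, htake]
        · simp [PySem.Str.slice, ← hcs, hdrop]
      · -- three or more signs: both None
        have hBsplit'' : pvSplitLast u' = some (u'', c'' :: v'') :=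
          hdec'' ▸ pv_splitLast_some u'' c'' v'' hc'' hv''
        have hge : cs.countP (fun c => decide (c = '+' ∨ c = '-')) ≠ 2 := by
          rw [hcntcs, hcntu, hdec'', List.countP_append,
            List.countP_cons_of_pos (by simpa using hc'')]
          omega
        have hA : ((0 : Int) + (cs.countP (fun c => decide (c = '+' ∨ c = '-')) : Int)) ≠ 2 := by
          intro h
          exact hge (by exact_mod_cast (by linarith : ((cs.countP (fun c => decide (c = '+' ∨ c = '-')) : Int)) = 2))
        simp [hcount, hBsplit, hBsplit', hBsplit'']
        have hsame : (cs.countP (fun c => decide (c = '+') || decide (c = '-')))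
            = cs.countP (fun c => decide (c = '+' ∨ c = '-')) := by
          apply List.countP_congr; intro a _; simp
        rw [hsame]
        simpa using hA
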